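-- pv_equiv track=rewrite | github.com/UmangBid/Projects- | Cryptography-Caesar-Cipher/main.py | refactor_position
-- ===== SOURCE A (Python) =====
-- def refactor_position(p_position, p_cipher_type):
--     if p_cipher_type == 'E':
--         while p_position > 25:
--             p_position = p_position - 26
--         return p_position
--     else:
--         while p_position < 0:
--             p_position = p_position + 26
--         return p_position
-- ===== SOURCE B (Python) =====
-- def refactor_position(p_position, p_cipher_type):
--     if p_cipher_type == 'E':
--         return p_position if p_position <= 25 else p_position % 26
--     else:
--         return p_position if p_position >= 0 else p_position % 26
-- ===== Notes on version B (the rewrite author's own statement) =====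
-- stated objective: simpler
-- what changed: Replaced each normalization while-loop by a guarded closed-form modulo: out-of-range positions are reduced with a single p_position % 26, in-range ones returned unchanged.
import Mathlib
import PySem

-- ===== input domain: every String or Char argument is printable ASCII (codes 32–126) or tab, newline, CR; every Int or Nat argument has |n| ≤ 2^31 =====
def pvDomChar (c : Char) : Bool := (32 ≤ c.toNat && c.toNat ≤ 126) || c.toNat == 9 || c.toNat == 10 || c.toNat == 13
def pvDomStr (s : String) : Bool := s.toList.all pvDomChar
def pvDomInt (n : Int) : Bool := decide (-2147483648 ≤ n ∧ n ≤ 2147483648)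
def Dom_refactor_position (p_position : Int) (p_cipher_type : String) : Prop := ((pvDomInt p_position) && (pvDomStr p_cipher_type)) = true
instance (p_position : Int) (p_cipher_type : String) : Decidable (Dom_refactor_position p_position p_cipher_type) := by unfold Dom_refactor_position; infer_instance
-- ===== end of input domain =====

-- B replaces each subtract/add-26 while-loop with one guarded closed-form `% 26` (simpler, O(1)).

-- ===== PORT A =====
-- while p_position > 25: p_position -= 26
def pvLoopE (p : Int) : Int :=
  if 25 < p then pvLoopE (p - 26) else p
termination_by p.toNat
decreasing_by
  omega

-- while p_position < 0: p_position += 26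
def pvLoopD (p : Int) : Int :=
  if p < 0 then pvLoopD (p + 26) else p
termination_by (-p).toNat
decreasing_by
  omega

def refactor_position (p_position : Int) (p_cipher_type : String) : Int :=
  if p_cipher_type = "E" then pvLoopE p_position else pvLoopD p_position

-- ===== PORT B =====
def refactor_position_alt (p_position : Int) (p_cipher_type : String) : Int :=
  if p_cipher_type = "E" then
    if p_position ≤ 25 then p_position else PySem.Int.mod p_position 26
  else
    if 0 ≤ p_position then p_position else PySem.Int.mod p_position 26

-- ===== PRECONDITION & SPEC =====
def Spec_refactor_position (p_position : Int) (p_cipher_type : String) (out : Int) : Prop := out = refactor_position_alt p_position p_cipher_type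
instance (p_position : Int) (p_cipher_type : String) (out : Int) : Decidable (Spec_refactor_position p_position p_cipher_type out) := by unfold Spec_refactor_position; infer_instance

-- ===== CLAIM (what is proved, stated in full; the proofs are below) =====
def Claim_equal_refactor_position : Prop := ∀ (p_position : Int) (p_cipher_type : String), Dom_refactor_position p_position p_cipher_type → Spec_refactor_position p_position p_cipher_type (refactor_position p_position p_cipher_type)

-- ===== LEMMAS AND PROOFS =====
theorem pvLoopE_closed : ∀ (n : ℕ) (p : Int), p ≤ 26 * n + 25 →
    pvLoopE p = if 25 < p then p % 26 else p := by
  intro n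
  induction n with
  | zero =>
      intro p hp
      rw [pvLoopE.eq_def]
      simp only [show ¬ (25 < p) by omega]
      simp
  | succ m ih =>
      intro p hp
      rw [pvLoopE.eq_def]
      by_cases h : 25 < p
      · simp only [h, if_pos]
        rw [ih (p - 26) (by omega)]
        split_ifs <;> omega
      · simp [h]

theorem pvLoopD_closed : ∀ (n : ℕ) (p : Int), -p ≤ 26 * n →
    pvLoopD p = if p < 0 then p % 26 else p := by
  intro n
  induction n with
  | zero =>
      intro p hp
      rw [pvLoopD.eq_def]
      simp only [show ¬ (p < 0) by omega]
      simp
  | succ m ih =>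
      intro p hp
      rw [pvLoopD.eq_def]
      by_cases h : p < 0
      · simp only [h, if_pos]
        rw [ih (p + 26) (by omega)]
        split_ifs <;> omega
      · simp [h]

-- ===== VERDICT (by name: the statement is the Claim_ definition above) =====
theorem refactor_position_spec : Claim_equal_refactor_position := by
  intro p t _
  unfold Spec_refactor_position refactor_position refactor_position_alt
  have hmod : PySem.Int.mod p 26 = p % 26 := PySem.Int.mod_eq_emod_of_pos (by norm_num)
  by_cases ht : t = "E" <;> simp only [ht, if_pos, if_neg, hmod]
  · rw [pvLoopE_closed p.toNat p (by omega)]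
    by_cases h : 25 < p <;> simp [h] <;> omega
  · simp only [ht, if_neg, not_false_iff]
    rw [pvLoopD_closed (-p).toNat p (by omega)]
    by_cases h : p < 0 <;> simp [h] <;> omega
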